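-- pv_equiv track=rewrite | github.com/MrBrantCode/unitest_baseline | mut_generate/mist_train_cf/cf_56158/solution.py | segregate_and_sort
-- ===== SOURCE A (Python) =====
-- def segregate_and_sort(arr, n):
--     sorted_arr = sorted(arr)
--     partition_size = len(arr) // n
--     remaining = len(arr) % n
--     start_index = 0
--     result = []
--
--     for i in range(n):
--         end_index = start_index + partition_size
--         if remaining > 0:
--             end_index += 1
--             remaining -= 1
--         result.append(sorted_arr[start_index:end_index])
--         start_index = end_index
--     return result
-- ===== SOURCE B (Python) =====
-- def segregate_and_sort(arr, n):
--     # Single pass placing each sorted element into its bucket by a per-element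
--     # index formula, instead of slicing out partitions.
--     q, r = divmod(len(arr), n)
--     buckets = [[] for _ in range(n)]
--     if n > 0:
--         for j, x in enumerate(sorted(arr)):
--             p = j // (q + 1) if j < r * (q + 1) else r + (j - r * (q + 1)) // q
--             buckets[p].append(x)
--     return buckets
-- ===== Notes on version B (the rewrite author's own statement) =====
-- stated objective: alternative
-- what changed: Instead of slicing the sorted array into n partitions with a running start_index/remaining cursor, B makes a single pass over the sorted elements and places each element into its bucket computed by a per-element index formula (j//(q+1) for the first r*(q+1) elements, else r+(j-r*(q+1))//q).
import Mathlib
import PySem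

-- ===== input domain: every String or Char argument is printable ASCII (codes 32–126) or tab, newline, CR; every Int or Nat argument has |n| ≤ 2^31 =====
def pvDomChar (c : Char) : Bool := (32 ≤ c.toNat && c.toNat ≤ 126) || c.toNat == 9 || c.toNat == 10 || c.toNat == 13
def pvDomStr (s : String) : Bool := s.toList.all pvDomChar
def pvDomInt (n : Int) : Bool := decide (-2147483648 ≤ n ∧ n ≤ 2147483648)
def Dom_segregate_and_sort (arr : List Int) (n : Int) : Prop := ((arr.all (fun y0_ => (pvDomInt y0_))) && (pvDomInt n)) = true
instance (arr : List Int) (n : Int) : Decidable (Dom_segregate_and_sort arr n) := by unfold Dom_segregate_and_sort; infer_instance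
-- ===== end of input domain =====

-- B replaces A's partition-slicing loop with a single pass over the sorted
-- elements, placing each element into its bucket by a per-element index
-- formula (objective: alternative decomposition, same cost).


-- ===== PORT A =====
-- A's loop body (one iteration over the state (start_index, remaining, result)).
def pvStep (sorted_arr : List Int) (partition_size : Int)
    (st : Int × Int × List (List Int)) (_i : Int) : Int × Int × List (List Int) :=
  let start_index := st.1
  let remaining := st.2.1
  let result := st.2.2
  let end_index := start_index + partition_size
  let end_index' := if remaining > 0 then end_index + 1 else end_index
  let remaining' := if remaining > 0 then remaining - 1 else remaining
  (end_index', remaining',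
    result ++ [PySem.List.slice sorted_arr (some start_index) (some end_index')])

def segregate_and_sort (arr : List Int) (n : Int) : List (List Int) :=
  let sorted_arr := PySem.List.sorted arr (fun x => x)
  let partition_size := PySem.Int.floordiv (arr.length : Int) n
  let remaining0 := PySem.Int.mod (arr.length : Int) n
  let final := (PySem.List.pyRange 0 n 1).foldl (pvStep sorted_arr partition_size)
    (0, remaining0, ([] : List (List Int)))
  final.2.2

-- ===== PORT B =====
-- B's per-element bucket index: j // (q+1) if j < r*(q+1) else r + (j - r*(q+1)) // q.
def pvBucketIdx (q r j : Int) : Int :=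
  if j < r * (q + 1) then PySem.Int.floordiv j (q + 1)
  else r + PySem.Int.floordiv (j - r * (q + 1)) q

-- buckets[p].append(x); List.modify is exact since 0 ≤ p < len(buckets) on every reached element.
def pvPlace (q r : Int) (bks : List (List Int)) (jx : Int × Int) : List (List Int) :=
  bks.modify (pvBucketIdx q r jx.1).toNat (· ++ [jx.2])

def segregate_and_sort_alt (arr : List Int) (n : Int) : List (List Int) :=
  match PySem.Int.divmod? (arr.length : Int) n with
  | none => []   -- n = 0: Python raises ZeroDivisionError (outside Pre_)
  | some (q, r) =>
    let buckets := (PySem.List.pyRange 0 n 1).map (fun _ => ([] : List Int))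
    if n > 0 then
      (PySem.List.enumerate (PySem.List.sorted arr (fun x => x)) 0).foldl (pvPlace q r) buckets
    else buckets

-- ===== PRECONDITION & SPEC =====
-- A raises ZeroDivisionError when n = 0 (so does B); that input is excluded.
def Pre_segregate_and_sort (arr : List Int) (n : Int) : Prop := n ≠ 0
instance (arr : List Int) (n : Int) : Decidable (Pre_segregate_and_sort arr n) := by unfold Pre_segregate_and_sort; infer_instance
def pvWitness_segregate_and_sort : List Int × Int := ([3, 1, 2, 5, 4], 2)

def Spec_segregate_and_sort (arr : List Int) (n : Int) (out : List (List Int)) : Prop := out = segregate_and_sort_alt arr n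
instance (arr : List Int) (n : Int) (out : List (List Int)) : Decidable (Spec_segregate_and_sort arr n out) := by unfold Spec_segregate_and_sort; infer_instance

-- ===== CLAIM (what is proved, stated in full; the proofs are below) =====
def Claim_equal_segregate_and_sort : Prop := ∀ (arr : List Int) (n : Int), Dom_segregate_and_sort arr n → Pre_segregate_and_sort arr n → Spec_segregate_and_sort arr n (segregate_and_sort arr n)

-- ===== LEMMAS AND PROOFS =====

-- The slice both ports produce as partition i (start i*q+min(i,r), end (i+1)*q+min(i+1,r)).
def pvSlice (sa : List Int) (q r i : Int) : List Int :=
  PySem.List.slice sa (some (i * q + min i r))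
    (some ((i + 1) * q + min (i + 1) r))

-- Partition i restricted to the first t sorted elements (B's bucket i after t placements).
def pvPart (sa : List Int) (q r t i : Int) : List Int :=
  PySem.List.slice sa (some (i * q + min i r))
    (some (min ((i + 1) * q + min (i + 1) r) t))

-- A-side loop invariant: after folding over range(k), the state is in closed form.
lemma pvLoopA (sa : List Int) (q r : Int) (hr : 0 ≤ r) :
    ∀ k : Int, 0 ≤ k →
      (PySem.List.pyRange 0 k 1).foldl (pvStep sa q) (0, r, ([] : List (List Int)))
        = (k * q + min k r, r - min k r, (PySem.List.pyRange 0 k 1).map (pvSlice sa q r)) := by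
  intro k hk
  induction k, hk using Int.le_induction with
  | base =>
    simp
    omega
  | succ k hk ih =>
    rw [PySem.List.pyRange_one_succ_right (by omega), List.foldl_append, ih, List.map_append]
    simp only [List.foldl_cons, List.foldl_nil, List.map_cons, List.map_nil]
    by_cases hkr : k < r
    · have h1 : min k r = k := by omega
      have h2 : min (k + 1) r = k + 1 := by omega
      simp only [pvStep, pvSlice, h1, h2]
      have hpos' : r - k > 0 := by omega
      rw [if_pos hpos', if_pos hpos']
      have e1 : k * q + k + q + 1 = (k + 1) * q + (k + 1) := by ring
      have e2 : r - k - 1 = r - (k + 1) := by ring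
      rw [e1, e2]
    · have h1 : min k r = r := by omega
      have h2 : min (k + 1) r = r := by omega
      simp only [pvStep, pvSlice, h1, h2]
      have hng : ¬ (r - r > 0) := by omega
      rw [if_neg hng, if_neg hng]
      have e1 : k * q + r + q = (k + 1) * q + r := by ring
      rw [e1]

-- Bounds of floor division by a positive divisor, for a nonnegative dividend.
lemma pvFdivBounds (a d : Int) (ha : 0 ≤ a) (hd : 0 < d) :
    0 ≤ PySem.Int.floordiv a d ∧ d * PySem.Int.floordiv a d ≤ a ∧
      a < d * (PySem.Int.floordiv a d + 1) := by
  have h := PySem.Int.floordiv_mul_add_mod a d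
  have h1 := PySem.Int.mod_nonneg a hd
  have h2 := PySem.Int.mod_lt a hd
  have hq : 0 ≤ PySem.Int.floordiv a d := by nlinarith
  refine ⟨hq, by nlinarith, by nlinarith⟩

-- B's bucket index p = pvBucketIdx q r j satisfies 0 ≤ p < n and start(p) ≤ j < start(p+1).
lemma pvIdxBounds (q r n j : Int) (hq : 0 ≤ q) (hr : 0 ≤ r) (hrn : r < n)
    (hj : 0 ≤ j) (hjm : j < q * n + r) :
    0 ≤ pvBucketIdx q r j ∧ pvBucketIdx q r j < n ∧
      pvBucketIdx q r j * q + min (pvBucketIdx q r j) r ≤ j ∧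
      j < (pvBucketIdx q r j + 1) * q + min (pvBucketIdx q r j + 1) r := by
  unfold pvBucketIdx
  by_cases hcase : j < r * (q + 1)
  · rw [if_pos hcase]
    set p := PySem.Int.floordiv j (q + 1) with hp
    obtain ⟨hp0, hpl, hpu⟩ := pvFdivBounds j (q + 1) hj (by omega)
    have hplt : p < r := by nlinarith
    have h1 : min p r = p := by omega
    have h2 : min (p + 1) r = p + 1 := by omega
    refine ⟨hp0, by omega, ?_, ?_⟩
    · rw [h1]; nlinarith
    · rw [h2]; nlinarith
  · rw [if_neg hcase]
    have ha : 0 ≤ j - r * (q + 1) := by omega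
    have hq0 : 0 < q := by
      rcases lt_or_eq_of_le hq with h | h
      · exact h
      · exfalso; rw [← h] at hjm hcase; simp at hjm hcase; omega
    set k := PySem.Int.floordiv (j - r * (q + 1)) q with hk
    obtain ⟨hk0, hkl, hku⟩ := pvFdivBounds _ q ha hq0
    have hkn : k < n - r := by nlinarith
    have h1 : min (r + k) r = r := by omega
    have h2 : min (r + k + 1) r = r := by omega
    refine ⟨by omega, by omega, ?_, ?_⟩
    · rw [h1]; nlinarith
    · rw [h2]; nlinarith

-- start is monotone in the partition index.
lemma pvStartMono (q r i j : Int) (hq : 0 ≤ q) (hij : i ≤ j) :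
    i * q + min i r ≤ j * q + min j r := by
  have : i * q ≤ j * q := mul_le_mul_of_nonneg_right hij hq
  omega

-- B-side invariant: placing the first t sorted elements fills bucket i with sa[start i : min(end i, t)].
lemma pvInvB (sa : List Int) (q r n : Int) (hq : 0 ≤ q) (hr : 0 ≤ r) (hrn : r < n)
    (hm : (sa.length : Int) = q * n + r) :
    ∀ t : Nat, t ≤ sa.length →
      (PySem.List.enumerate (sa.take t) 0).foldl (pvPlace q r)
          ((PySem.List.pyRange 0 n 1).map (fun _ => ([] : List Int)))
        = (PySem.List.pyRange 0 n 1).map (fun i => pvPart sa q r (t : Int) i) := by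
  intro t
  induction t with
  | zero =>
    intro _
    simp only [List.take_zero, PySem.List.enumerate_nil, List.foldl_nil]
    apply List.map_congr_left
    intro i hi
    have hi' := (PySem.List.mem_pyRange_one.mp hi).1
    have hiq : 0 ≤ i * q := mul_nonneg hi' hq
    have hs : 0 ≤ i * q + min i r := by omega
    have hmin : min ((i + 1) * q + min (i + 1) r) ((0 : Nat) : Int) = 0 := by
      have : 0 ≤ (i + 1) * q := mul_nonneg (by omega) hq
      push_cast; omega
    unfold pvPart
    rw [hmin, PySem.List.slice_toNat _ hs le_rfl]
    simp
  | succ t ih =>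
    intro hlt
    have ht : t < sa.length := by omega
    have htake : sa.take (t + 1) = sa.take t ++ [sa[t]] := by
      rw [List.take_succ, List.getElem?_eq_getElem ht]
      rfl
    rw [htake, PySem.List.enumerate_append, List.foldl_append, ih (by omega)]
    have hlen : (0 : Int) + ((sa.take t).length : Int) = (t : Int) := by
      simp [List.length_take]; omega
    rw [hlen]
    simp only [PySem.List.enumerate_cons, PySem.List.enumerate_nil, List.foldl_cons,
      List.foldl_nil]
    -- one placement step
    unfold pvPlace
    dsimp only
    obtain ⟨hp0, hpn, hpl, hpu⟩ := pvIdxBounds q r n (t : Int) hq hr hrn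
      (by positivity) (by rw [← hm]; exact_mod_cast ht)
    set p := pvBucketIdx q r (t : Int) with hpdef
    apply List.ext_getElem
    · simp
    intro k hk1 hk2
    rw [List.getElem_modify]
    have hkn : k < (PySem.List.pyRange 0 n 1).length := by
      simpa using hk2
    rw [List.getElem_map, List.getElem_map, PySem.List.getElem_pyRange_one _ _ _ hkn]
    simp only [zero_add]
    have hk0 : (0 : Int) ≤ (k : Int) := by positivity
    have hkq : 0 ≤ (k : Int) * q := mul_nonneg hk0 hq
    have hsk : 0 ≤ (k : Int) * q + min (k : Int) r := by omega
    have hkq1 : 0 ≤ ((k : Int) + 1) * q := mul_nonneg (by omega) hq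
    have hek : 0 ≤ ((k : Int) + 1) * q + min ((k : Int) + 1) r := by omega
    have hcast : (((t + 1 : Nat)) : Int) = (t : Int) + 1 := by push_cast; ring
    by_cases heq : p.toNat = k
    · rw [if_pos heq]
      have hkp : (k : Int) = p := by omega
      unfold pvPart
      rw [hkp, hcast]
      have hq1 : 0 ≤ (p + 1) * q := mul_nonneg (by omega) hq
      have hsp : 0 ≤ p * q + min p r := by
        have := mul_nonneg hp0 hq; omega
      have hminT : min ((p + 1) * q + min (p + 1) r) ((t : Nat) : Int) = (t : Int) := by omega
      have hminT1 : min ((p + 1) * q + min (p + 1) r) ((t : Int) + 1) = (t : Int) + 1 := by omega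
      rw [hminT, hminT1,
          PySem.List.slice_toNat _ hsp (by positivity),
          PySem.List.slice_toNat _ hsp (by positivity)]
      set s := (p * q + min p r).toNat with hsdef
      have hst : s ≤ t := by omega
      have h1 : ((t : Int) + 1).toNat - s = (((t : Int)).toNat - s) + 1 := by omega
      have h2 : ((t : Int)).toNat = t := by omega
      rw [h1, h2, List.take_succ]
      congr 1
      rw [List.getElem?_drop, List.getElem?_eq_getElem (by omega)]
      congr 2
      omega
    · rw [if_neg heq]
      unfold pvPart
      rw [hcast]
      have hne : (k : Int) ≠ p := by omega
      rcases lt_or_gt_of_ne hne with hlt' | hgt'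
      · -- k < p: end(k) ≤ start(p) ≤ t; both mins are end(k)
        have hmono := pvStartMono q r ((k : Int) + 1) p hq (by omega)
        have hkend : ((k : Int) + 1) * q + min ((k : Int) + 1) r ≤ (t : Int) := by omega
        have m1 : min (((k : Int) + 1) * q + min ((k : Int) + 1) r) ((t : Nat) : Int)
            = ((k : Int) + 1) * q + min ((k : Int) + 1) r := by omega
        have m2 : min (((k : Int) + 1) * q + min ((k : Int) + 1) r) ((t : Int) + 1)
            = ((k : Int) + 1) * q + min ((k : Int) + 1) r := by omega
        rw [m1, m2]
      · -- k > p: start(k) ≥ end(p) ≥ t+1; both slices empty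
        have hmono := pvStartMono q r (p + 1) (k : Int) hq (by omega)
        have hkstart : (t : Int) + 1 ≤ (k : Int) * q + min (k : Int) r := by omega
        rw [PySem.List.slice_toNat _ hsk (by omega),
            PySem.List.slice_toNat _ hsk (by omega)]
        have e1 : (min (((k : Int) + 1) * q + min ((k : Int) + 1) r) ((t : Nat) : Int)).toNat
            - ((k : Int) * q + min (k : Int) r).toNat = 0 := by omega
        have e2 : (min (((k : Int) + 1) * q + min ((k : Int) + 1) r) ((t : Int) + 1)).toNat
            - ((k : Int) * q + min (k : Int) r).toNat = 0 := by omega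
        rw [e1, e2]

-- ===== VERDICT (by name: the statement is the Claim_ definition above) =====
theorem segregate_and_sort_spec : Claim_equal_segregate_and_sort := by
  intro arr n _hdom hn
  unfold Pre_segregate_and_sort at hn
  unfold Spec_segregate_and_sort segregate_and_sort segregate_and_sort_alt
  have hdm : PySem.Int.divmod? (arr.length : Int) n
      = some (PySem.Int.floordiv (arr.length : Int) n, PySem.Int.mod (arr.length : Int) n) := by
    simp [PySem.Int.divmod?, PySem.Int.floordiv, PySem.Int.mod, hn]
  rw [hdm]
  rcases lt_trichotomy n 0 with hneg | hzero | hpos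
  · -- range(n) empty: both sides []
    rw [PySem.List.pyRange_one_eq_nil (by omega)]
    simp [show ¬ (n > 0) by omega]
  · exact absurd hzero hn
  · have hL : (0 : Int) ≤ (arr.length : Int) := by positivity
    set sa := PySem.List.sorted arr (fun x => x) with hsa
    set q := PySem.Int.floordiv (arr.length : Int) n with hqdef
    set r := PySem.Int.mod (arr.length : Int) n with hrdef
    have hr0 : 0 ≤ r := PySem.Int.mod_nonneg _ hpos
    have hrlt : r < n := PySem.Int.mod_lt _ hpos
    have hq0 : 0 ≤ q := (pvFdivBounds _ n hL hpos).1
    have hid : q * n + r = (arr.length : Int) := PySem.Int.floordiv_mul_add_mod _ n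
    have hsalen : sa.length = arr.length := PySem.List.length_sorted arr _ _
    have hsm : (sa.length : Int) = q * n + r := by rw [hsalen, hid]
    have hA := pvLoopA sa q r hr0 n (le_of_lt hpos)
    have hB := pvInvB sa q r n hq0 hr0 hrlt hsm sa.length le_rfl
    rw [List.take_length] at hB
    dsimp only
    rw [if_pos hpos, hA, hB]
    apply List.map_congr_left
    intro i hi
    obtain ⟨hi0, hin⟩ := PySem.List.mem_pyRange_one.mp hi
    unfold pvSlice pvPart
    have hle : ((i + 1) * q + min (i + 1) r) ≤ (sa.length : Int) := by
      have h1 : (i + 1) * q ≤ n * q := mul_le_mul_of_nonneg_right (by omega) hq0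
      have h2 : n * q = q * n := mul_comm n q
      omega
    rw [min_eq_left hle]
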